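-- pv_equiv track=rewrite | github.com/timothysyquah/Toolbox | phase-diagrams/resubmit_ODTlike_calculations.py | Seperate_Categories_unique
-- ===== SOURCE A (Python) =====
-- def Seperate_Categories_unique(listofcategory):
--     depth = len(listofcategory[0]) - 2
--     returnlist = []
--     for i in range(0, depth):
--         templist = []
--         for j in range(0, len(listofcategory)):
--             templist.append(listofcategory[j][i])
--
--         templist = sorted(list(set(templist)))
--         returnlist.append(templist)
--
--     return returnlist
-- ===== SOURCE B (Python) =====
-- def Seperate_Categories_unique(listofcategory):
--     depth = len(listofcategory[0]) - 2
--     # one global lexicographic sort of all distinct (column, value) pairs,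
--     # then a single grouping sweep — instead of per-column set+sort passes
--     pairs = sorted({(i, row[i]) for row in listofcategory for i in range(depth)})
--     groups = {}
--     for i, v in pairs:
--         groups.setdefault(i, []).append(v)
--     return [groups.get(i, []) for i in range(depth)]
-- ===== Notes on version B (the rewrite author's own statement) =====
-- stated objective: alternative
-- what changed: B flattens the table to a set of (column,value) pairs, sorts that whole set once lexicographically, and splits the sorted run into per-column groups in one sweep, instead of A's depth independent column sweeps each followed by set() and sorted().
import Mathlib
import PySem

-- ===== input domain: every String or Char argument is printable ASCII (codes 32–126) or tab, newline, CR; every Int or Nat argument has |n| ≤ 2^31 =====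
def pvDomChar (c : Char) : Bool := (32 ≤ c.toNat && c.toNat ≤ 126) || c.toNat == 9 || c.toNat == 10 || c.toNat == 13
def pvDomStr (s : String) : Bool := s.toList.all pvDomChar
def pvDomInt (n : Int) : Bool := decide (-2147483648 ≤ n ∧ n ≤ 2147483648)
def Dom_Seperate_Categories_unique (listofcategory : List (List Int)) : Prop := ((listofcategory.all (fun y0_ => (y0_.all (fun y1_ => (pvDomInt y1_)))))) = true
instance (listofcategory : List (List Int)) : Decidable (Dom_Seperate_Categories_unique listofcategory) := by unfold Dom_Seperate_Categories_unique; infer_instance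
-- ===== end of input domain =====

-- B replaces A's per-column sweeps (set per column, then sort) by ONE global lexicographic sort of the
-- distinct (column, value) pairs followed by a single grouping sweep (alternative algorithm, same cost).

-- ===== PORT A =====
def Seperate_Categories_unique (listofcategory : List (List Int)) : List (List Int) :=
  let depth : Int := PySem.List.len (PySem.List.pyGetD listofcategory 0 []) - 2
  (PySem.List.pyRange 0 depth 1).foldl
    (fun returnlist i =>
      let templist : List Int :=
        (PySem.List.pyRange 0 (PySem.List.len listofcategory) 1).foldl
          (fun t j => t ++ [PySem.List.pyGetD (PySem.List.pyGetD listofcategory j []) i 0]) []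
      -- sorted(list(set(templist))): set(templist) is PySem.Set.ofList; the hash order of list(…) is
      -- immediately sorted away, so sorting the Set is exact
      returnlist ++ [PySem.List.sorted (PySem.Set.ofList templist) (fun x => x) false]) []

-- ===== PORT B =====
def Seperate_Categories_unique_alt (listofcategory : List (List Int)) : List (List Int) :=
  let depth : Int := PySem.List.len (PySem.List.pyGetD listofcategory 0 []) - 2
  -- the set comprehension {(i, row[i]) for row in listofcategory for i in range(depth)}
  let pairset : PySem.Set (Int × Int) :=
    PySem.Set.ofList (listofcategory.flatMap
      (fun row => (PySem.List.pyRange 0 depth 1).map (fun i => (i, PySem.List.pyGetD row i 0))))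
  -- sorted(pairset): Python compares tuples lexicographically = sorted2 with the two component keys
  let pairs : List (Int × Int) := PySem.List.sorted2 pairset (fun p => p.1) (fun p => p.2) false
  -- for i, v in pairs: groups.setdefault(i, []).append(v)
  let groups : PySem.Dict Int (List Int) :=
    pairs.foldl (fun d p => d.modify p.1 [] (fun g => g ++ [p.2])) PySem.Dict.empty
  (PySem.List.pyRange 0 depth 1).map (fun i => groups.getD i [])

-- ===== PRECONDITION & SPEC =====
-- Pre_ excludes exactly the inputs where A raises IndexError: the empty list (listofcategory[0]),
-- and inputs with a row shorter than depth = len(listofcategory[0]) - 2 (listofcategory[j][i]).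
def Pre_Seperate_Categories_unique (listofcategory : List (List Int)) : Prop :=
  listofcategory ≠ [] ∧
    ∀ row ∈ listofcategory, ((listofcategory.headD []).length : Int) - 2 ≤ (row.length : Int)
instance (listofcategory : List (List Int)) : Decidable (Pre_Seperate_Categories_unique listofcategory) := by unfold Pre_Seperate_Categories_unique; infer_instance

def pvWitness_Seperate_Categories_unique : List (List Int) := [[1, 2, 3], [4, 5, 6], [1, 7, 8]]

def Spec_Seperate_Categories_unique (listofcategory : List (List Int)) (out : List (List Int)) : Prop := out = Seperate_Categories_unique_alt listofcategory
instance (listofcategory : List (List Int)) (out : List (List Int)) : Decidable (Spec_Seperate_Categories_unique listofcategory out) := by unfold Spec_Seperate_Categories_unique; infer_instance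

-- ===== CLAIM (what is proved, stated in full; the proofs are below) =====
def Claim_equal_Seperate_Categories_unique : Prop := ∀ (listofcategory : List (List Int)), Dom_Seperate_Categories_unique listofcategory → Pre_Seperate_Categories_unique listofcategory → Spec_Seperate_Categories_unique listofcategory (Seperate_Categories_unique listofcategory)

-- ===== LEMMAS AND PROOFS =====

-- the sorted distinct values of column k (0 as the out-of-range default, never reached under Pre_)
def pvCol (l : List (List Int)) (k : Nat) : List Int :=
  PySem.List.sorted (PySem.Set.ofList (l.map (fun row => row.getD k 0))) (fun x => x) false

-- the value both programs compute: per column k < n, sorted distinct values of column k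
def pvRef (l : List (List Int)) (n : Nat) : List (List Int) :=
  (List.range n).map (fun k => pvCol l k)

lemma map_range_getD {α β : Type} [Inhabited α] (l : List α) (d : α) (g : α → β) :
    (List.range l.length).map (fun j => g (l.getD j d)) = l.map g := by
  apply List.ext_getElem
  · simp
  · intro i h1 h2
    have hi : i < l.length := by simpa using h2
    simp [List.getElem?_eq_getElem hi]

lemma A_eq_ref (l : List (List Int)) :
    Seperate_Categories_unique l
    = pvRef l (PySem.List.len (PySem.List.pyGetD l 0 []) - 2).toNat := by
  unfold Seperate_Categories_unique pvRef pvCol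
  simp only [PySem.List.foldl_append_singleton_eq_map, List.nil_append,
    PySem.List.pyRange_one, Int.sub_zero, List.map_map]
  apply List.map_congr_left
  intro k hk
  simp only [Function.comp_def, zero_add, PySem.List.pyGetD_natCast, PySem.List.len, Int.toNat_natCast]
  rw [map_range_getD l [] (fun row => row.getD k 0)]

-- the globally sorted pair list, written as the concatenation of its per-column blocks
def pvT (l : List (List Int)) (n : Nat) : List (Int × Int) :=
  (List.range n).flatMap (fun k => (pvCol l k).map (fun v => ((k : Int), v)))

-- Python's tuple comparison: sorted2 with the two projections = sorted with the lexicographic key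
lemma sorted2_eq_sorted_lex (xs : List (Int × Int)) :
    PySem.List.sorted2 xs (fun p => p.1) (fun p => p.2) false
    = PySem.List.sorted xs (fun p => (toLex p : Lex (Int × Int))) false := by
  rw [PySem.List.sorted_eq_foldl_insertBy]
  unfold PySem.List.sorted2
  have hb : (fun (a b : Int × Int) =>
      (decide (a.1 < b.1) || !decide (b.1 < a.1) && decide (a.2 < b.2)))
      = (fun (a b : Int × Int) => decide ((toLex a : Lex (Int × Int)) < toLex b)) := by
    funext a b
    have : ((toLex a : Lex (Int × Int)) < toLex b) ↔ (a.1 < b.1 ∨ a.1 = b.1 ∧ a.2 < b.2) :=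
      Prod.Lex.lt_iff
    by_cases h1 : a.1 < b.1 <;> by_cases h2 : b.1 < a.1 <;> by_cases h3 : a.2 < b.2 <;>
      simp [this, h1, h2, h3] <;> omega
  simp only [Bool.false_eq_true, if_false, hb]

lemma pvT_pairwise (l : List (List Int)) (n : Nat) :
    (pvT l n).Pairwise (fun a b => (toLex a : Lex (Int × Int)) < toLex b) := by
  unfold pvT
  rw [List.pairwise_flatMap]
  constructor
  · intro k _
    apply List.Pairwise.map
    · intro a b hab
      exact Prod.Lex.lt_iff.mpr (Or.inr ⟨rfl, hab⟩)
    · exact PySem.List.sorted_ofList_pairwise_lt _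
  · have : (List.range n).Pairwise (· < ·) := List.pairwise_lt_range
    apply this.imp
    intro j k hjk x hx y hy
    simp only [List.mem_map] at hx hy
    obtain ⟨xv, _, rfl⟩ := hx
    obtain ⟨yv, _, rfl⟩ := hy
    refine Prod.Lex.lt_iff.mpr (Or.inl ?_)
    simp only [ofLex_toLex]
    exact_mod_cast hjk

lemma pvT_perm (l : List (List Int)) (depth : Int) :
    (pvT l depth.toNat).Perm
      (PySem.Set.ofList (l.flatMap
        (fun row => (PySem.List.pyRange 0 depth 1).map (fun i => (i, PySem.List.pyGetD row i 0))))) := by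
  rw [List.perm_ext_iff_of_nodup]
  · intro p
    rw [PySem.Set.mem_ofList]
    unfold pvT
    simp only [List.mem_flatMap, List.mem_map, List.mem_range,
      PySem.List.pyRange_one, Int.sub_zero, zero_add, pvCol,
      PySem.List.mem_sorted, PySem.Set.mem_ofList]
    constructor
    · rintro ⟨k, hk, v, ⟨row, hrow, rfl⟩, rfl⟩
      exact ⟨row, hrow, (k : Int), ⟨k, hk, rfl⟩, by rw [PySem.List.pyGetD_natCast]⟩
    · rintro ⟨row, hrow, i, ⟨k, hk, rfl⟩, rfl⟩
      exact ⟨k, hk, row.getD k 0, ⟨row, hrow, rfl⟩, by rw [PySem.List.pyGetD_natCast]⟩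
  · exact (pvT_pairwise l depth.toNat).imp (fun hab h => by subst h; exact lt_irrefl _ hab)
  · exact PySem.Set.nodup_ofList _

-- the sorted run splits back into its blocks: filtering column k of pvT gives pvCol k
lemma flatMap_single {β : Type} (n k : Nat) (hk : k < n) (g : Nat → List β)
    (hg : ∀ j, j ≠ k → g j = []) : (List.range n).flatMap g = g k := by
  induction n with
  | zero => omega
  | succ m ih =>
    rw [List.range_succ, List.flatMap_append]
    by_cases h : k = m
    · subst h
      rw [List.flatMap_eq_nil_iff.mpr (fun x hx => hg x (by simp at hx; omega))]
      simp
    · rw [ih (by omega)]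
      simp [hg m (by omega)]
  
lemma filter_pvT (l : List (List Int)) (n k : Nat) (hk : k < n) :
    ((pvT l n).filter (fun p => p.1 == (k : Int))).map (fun p => p.2) = pvCol l k := by
  unfold pvT
  rw [List.filter_flatMap]
  rw [flatMap_single n k hk _ ?_]
  · rw [List.filter_map]
    simp [Function.comp_def, List.filter_true]
  · intro j hj
    rw [List.filter_map]
    have : (fun (p : Int × Int) => p.1 == (k:Int)) ∘ (fun (v : Int) => ((j:Int), v)) = fun (_ : Int) => false := by
      funext v
      simp only [Function.comp_apply]
      simp only [beq_eq_false_iff_ne, ne_eq, Int.natCast_inj]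
      omega
    rw [this, List.filter_false, List.map_nil]

lemma B_eq_ref (l : List (List Int)) :
    Seperate_Categories_unique_alt l
    = pvRef l (PySem.List.len (PySem.List.pyGetD l 0 []) - 2).toNat := by
  unfold Seperate_Categories_unique_alt pvRef
  set depth : Int := PySem.List.len (PySem.List.pyGetD l 0 []) - 2 with hdepth
  simp only [sorted2_eq_sorted_lex]
  rw [PySem.List.sorted_eq_of_perm_of_pairwise_lt _ (pvT l depth.toNat) _
    (pvT_perm l depth) (pvT_pairwise l depth.toNat)]
  rw [PySem.List.pyRange_one, Int.sub_zero, List.map_map]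
  apply List.map_congr_left
  intro k hk
  simp only [Function.comp_def, zero_add]
  rw [PySem.Dict.getD_foldl_modify_append]
  rw [filter_pvT l depth.toNat k (List.mem_range.mp hk)]
  simp [PySem.Dict.empty, PySem.Dict.getD, PySem.Dict.get?]

-- ===== VERDICT (by name: the statement is the Claim_ definition above) =====
theorem Seperate_Categories_unique_spec : Claim_equal_Seperate_Categories_unique := by
  intro l _ _
  unfold Spec_Seperate_Categories_unique
  rw [A_eq_ref l, B_eq_ref l]
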